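-- pv_equiv track=rewrite | github.com/webwanderer2024/wondrous_net | Black and White.py | get_placing_outline
-- ===== SOURCE A (Python) =====
-- def get_placing_outline(placing, num_cols, num_rows):
--     """Function that creates outline of the placing for output that consists of bars, underscores and spaces.
--        Input:
--            placing - tuple of tuples, each of which represnt one placed strip and consist of 3 parts:
--            1) tuple of two integers that represent position of left lower cell of the strip;
--            2) string: orientation of the strip ('horizontal' or 'vertical');
--            3) integer: length of the strip.
--            num_cols - integer: number of columns in the grid.
--            num_rows - integer: number of rows in the grid.
--        Output:
--            list of strings, where each string, consisted of bars, underscores and spaces, represent one horizontal level of the outline."""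
--     cells_without_left_border = ()
--     cells_without_lower_border = ()
--     for strip in placing:
--         first_cell = strip[0]
--         col,row = first_cell[0],first_cell[1]
--         orientation = strip[1]
--         strip_len = strip[2]
--         if orientation == 'horizontal':
--             for strip_index in range(1, strip_len):
--                 cells_without_left_border += ((col + strip_index, row),)
--         elif orientation == 'vertical':
--             for strip_index in range(1, strip_len):
--                 cells_without_lower_border += ((col, row + strip_index),)
--     outline = []
--     # decremental loop for rows with one additional row for the upper border of the grid
--     for row in range(num_rows,-1,-1):
--         level = ''
--         # loop for cols with one additional col for the right border of the grid
--         for col in range(num_cols+1):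
--             cell = (col,row)
--             if row < num_rows and (col == 0 or col == num_cols or not cell in cells_without_left_border):
--                 level += '|'
--             else:
--                 level += ' '
--             if col < num_cols:
--                 if row == 0 or row == num_rows or not cell in cells_without_lower_border:
--                     level += '_'
--                 else:
--                     level += ' '
--         outline.append(level)
--     return outline
-- ===== SOURCE B (Python) =====
-- def get_placing_outline(placing, num_cols, num_rows):
--     """Paint-over-buffer rewrite: build the default outline grid once, then for each
--        strip overwrite the interior border cells it removes; avoids the per-cell
--        membership scan over the strip-cell tuples."""
--     if num_rows < 0:
--         return []
--     grid = []
--     for r in range(num_rows + 1):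
--         line = []
--         for c in range(num_cols + 1):
--             line.append('|' if r < num_rows else ' ')
--             if c < num_cols:
--                 line.append('_')
--         grid.append(line)
--     for (col, row), orientation, strip_len in placing:
--         if orientation == 'horizontal':
--             if 0 <= row < num_rows:
--                 for c in range(max(col + 1, 1), min(col + strip_len, num_cols)):
--                     grid[row][2 * c] = ' '
--         elif orientation == 'vertical':
--             if 0 <= col < num_cols:
--                 for r in range(max(row + 1, 1), min(row + strip_len, num_rows)):
--                     grid[r][2 * col + 1] = ' '
--     return [''.join(grid[r]) for r in range(num_rows, -1, -1)]
-- ===== Notes on version B (the rewrite author's own statement) =====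
-- stated objective: faster
-- what changed: Instead of collecting all no-border cells into tuples and querying membership for every grid position, B builds the default outline as a mutable 2D character grid once and lets each strip directly overwrite (paint) the interior border cells it removes, clamped to the grid.
import Mathlib
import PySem

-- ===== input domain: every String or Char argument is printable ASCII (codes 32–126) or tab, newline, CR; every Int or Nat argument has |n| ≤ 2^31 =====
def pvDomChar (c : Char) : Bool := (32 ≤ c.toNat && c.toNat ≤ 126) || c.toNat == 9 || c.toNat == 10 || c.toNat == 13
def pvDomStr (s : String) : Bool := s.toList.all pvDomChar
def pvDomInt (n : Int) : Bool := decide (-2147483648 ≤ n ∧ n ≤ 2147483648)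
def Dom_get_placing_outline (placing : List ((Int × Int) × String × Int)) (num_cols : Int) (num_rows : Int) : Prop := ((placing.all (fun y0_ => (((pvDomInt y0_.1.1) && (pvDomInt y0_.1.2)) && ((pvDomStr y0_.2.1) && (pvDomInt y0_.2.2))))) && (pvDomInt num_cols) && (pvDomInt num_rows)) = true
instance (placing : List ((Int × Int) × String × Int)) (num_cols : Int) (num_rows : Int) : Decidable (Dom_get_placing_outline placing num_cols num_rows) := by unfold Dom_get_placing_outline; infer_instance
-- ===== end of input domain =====

-- B paints each strip over a precomputed default character grid instead of collecting
-- all no-border cells into tuples and querying membership at every grid position.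

-- ===== PORT A =====
-- A's first loop: accumulate (cells_without_left_border, cells_without_lower_border)
def gpoCellsStep (st : List (Int × Int) × List (Int × Int)) (strip : (Int × Int) × String × Int) :
    List (Int × Int) × List (Int × Int) :=
  let col := strip.1.1
  let row := strip.1.2
  let orientation := strip.2.1
  let strip_len := strip.2.2
  if orientation = "horizontal" then
    ((PySem.List.pyRange 1 strip_len 1).foldl (fun cs i => cs ++ [(col + i, row)]) st.1, st.2)
  else if orientation = "vertical" then
    (st.1, (PySem.List.pyRange 1 strip_len 1).foldl (fun cs i => cs ++ [(col, row + i)]) st.2)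
  else st

def get_placing_outline (placing : List ((Int × Int) × String × Int)) (num_cols : Int) (num_rows : Int) : List String :=
  let cells := placing.foldl gpoCellsStep ([], [])
  let noLeft := cells.1
  let noLower := cells.2
  (PySem.List.pyRange num_rows (-1) (-1)).foldl (fun outline row =>
    let level : List Char := (PySem.List.pyRange 0 (num_cols + 1) 1).foldl (fun level col =>
      let cell := (col, row)
      let level := if row < num_rows ∧ (col = 0 ∨ col = num_cols ∨ cell ∉ noLeft)
                   then level ++ ['|'] else level ++ [' ']
      if col < num_cols then
        (if row = 0 ∨ row = num_rows ∨ cell ∉ noLower then level ++ ['_'] else level ++ [' '])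
      else level) []
    outline ++ [String.ofList level]) []

-- ===== PORT B =====
def gpoDefaultRow (num_cols num_rows r : Int) : List Char :=
  (PySem.List.pyRange 0 (num_cols + 1) 1).foldl (fun line c =>
    let line := line ++ [if r < num_rows then '|' else ' ']
    if c < num_cols then line ++ ['_'] else line) []

-- grid[r][j] = ' '
def gpoSetCell (g : List (List Char)) (r j : Nat) : List (List Char) :=
  g.modify r (fun line => line.set j ' ')

def gpoPaint (num_cols num_rows : Int) (g : List (List Char)) (strip : (Int × Int) × String × Int) :
    List (List Char) :=
  let col := strip.1.1
  let row := strip.1.2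
  let orientation := strip.2.1
  let strip_len := strip.2.2
  if orientation = "horizontal" then
    if 0 ≤ row ∧ row < num_rows then
      (PySem.List.pyRange (max (col + 1) 1) (min (col + strip_len) num_cols) 1).foldl
        (fun g c => gpoSetCell g row.toNat (2 * c).toNat) g
    else g
  else if orientation = "vertical" then
    if 0 ≤ col ∧ col < num_cols then
      (PySem.List.pyRange (max (row + 1) 1) (min (row + strip_len) num_rows) 1).foldl
        (fun g r => gpoSetCell g r.toNat (2 * col + 1).toNat) g
    else g
  else g

def get_placing_outline_alt (placing : List ((Int × Int) × String × Int)) (num_cols : Int) (num_rows : Int) : List String :=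
  if num_rows < 0 then []
  else
    let g := placing.foldl (gpoPaint num_cols num_rows)
      ((PySem.List.pyRange 0 (num_rows + 1) 1).map (gpoDefaultRow num_cols num_rows))
    (PySem.List.pyRange num_rows (-1) (-1)).map (fun r => String.ofList (g.getD r.toNat []))

-- ===== PRECONDITION & SPEC =====
def Spec_get_placing_outline (placing : List ((Int × Int) × String × Int)) (num_cols : Int) (num_rows : Int) (out : List String) : Prop := out = get_placing_outline_alt placing num_cols num_rows
instance (placing : List ((Int × Int) × String × Int)) (num_cols : Int) (num_rows : Int) (out : List String) : Decidable (Spec_get_placing_outline placing num_cols num_rows out) := by unfold Spec_get_placing_outline; infer_instance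

-- ===== CLAIM (what is proved, stated in full; the proofs are below) =====
def Claim_equal_get_placing_outline : Prop := ∀ (placing : List ((Int × Int) × String × Int)) (num_cols : Int) (num_rows : Int), Dom_get_placing_outline placing num_cols num_rows → Spec_get_placing_outline placing num_cols num_rows (get_placing_outline placing num_cols num_rows)

-- ===== LEMMAS AND PROOFS =====

-- the cells one horizontal / vertical strip removes the border of (A's first loop, per strip)
def gpoHCells (s : (Int × Int) × String × Int) : List (Int × Int) :=
  if s.2.1 = "horizontal" then (PySem.List.pyRange 1 s.2.2 1).map (fun i => (s.1.1 + i, s.1.2)) else []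

def gpoVCells (s : (Int × Int) × String × Int) : List (Int × Int) :=
  if s.2.1 = "horizontal" then []
  else if s.2.1 = "vertical" then
    (PySem.List.pyRange 1 s.2.2 1).map (fun i => (s.1.1, s.1.2 + i))
  else []

-- whether B's paint of strip s writes grid position (r, j)
abbrev gpoPaintsAt (num_cols num_rows : Int) (s : (Int × Int) × String × Int) (r j : Nat) : Prop :=
  (s.2.1 = "horizontal" ∧ 0 ≤ s.1.2 ∧ s.1.2 < num_rows ∧ r = s.1.2.toNat ∧
    ∃ c ∈ PySem.List.pyRange (max (s.1.1 + 1) 1) (min (s.1.1 + s.2.2) num_cols) 1, j = (2 * c).toNat)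
  ∨ (s.2.1 ≠ "horizontal" ∧ s.2.1 = "vertical" ∧ 0 ≤ s.1.1 ∧ s.1.1 < num_cols ∧
    j = (2 * s.1.1 + 1).toNat ∧
    ∃ rr ∈ PySem.List.pyRange (max (s.1.2 + 1) 1) (min (s.1.2 + s.2.2) num_rows) 1, r = rr.toNat)

def gpoCharAt (g : List (List Char)) (r j : Nat) : Char := (g.getD r []).getD j ' '

-- characters of the interleaved outline row: left-border char, then (inside the grid) lower-border char
def gpoRowShape (nc : Int) (f g : Int → Char) : List Char :=
  (PySem.List.pyRange 0 (nc + 1) 1).flatMap (fun c => f c :: (if c < nc then [g c] else []))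

theorem gpoSetCell_length (g : List (List Char)) (R J : Nat) :
    (gpoSetCell g R J).length = g.length := by
  simp [gpoSetCell]

theorem gpoSetCell_rowLen (g : List (List Char)) (R J r : Nat) :
    ((gpoSetCell g R J).getD r []).length = (g.getD r []).length := by
  simp only [gpoSetCell, List.getD_eq_getElem?_getD, List.getElem?_modify]
  cases h : g[r]? <;> simp <;> split <;> simp

theorem gpoSetCell_charAt (g : List (List Char)) (R J r j : Nat) :
    gpoCharAt (gpoSetCell g R J) r j =
      if r = R ∧ j = J ∧ R < g.length ∧ J < (g.getD R []).length then ' ' else gpoCharAt g r j := by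
  by_cases hr : r = R
  · subst hr
    by_cases hR : r < g.length
    · have hg : g[r]? = some g[r] := List.getElem?_eq_getElem hR
      have hgd : g.getD r [] = g[r] := by simp [List.getD_eq_getElem?_getD, hg]
      by_cases hj : j = J
      · subst hj
        by_cases hJ : j < (g.getD r []).length
        · rw [if_pos ⟨rfl, rfl, hR, hJ⟩]
          rw [hgd] at hJ
          simp [gpoCharAt, gpoSetCell, List.getD_eq_getElem?_getD, List.getElem?_modify,
            hg, List.getElem?_set, hJ]
        · rw [if_neg (by tauto)]
          rw [hgd] at hJ
          simp [gpoCharAt, gpoSetCell, List.getD_eq_getElem?_getD, List.getElem?_modify,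
            hg, List.getElem?_set, hJ, List.getElem?_eq_none_iff.2 (by omega : g[r].length ≤ j)]
      · rw [if_neg (by tauto)]
        simp [gpoCharAt, gpoSetCell, List.getD_eq_getElem?_getD, List.getElem?_modify,
          hg, List.getElem?_set, hj, Ne.symm hj]
    · rw [if_neg (by tauto)]
      have hg : g[r]? = none := List.getElem?_eq_none_iff.2 (by omega)
      simp [gpoCharAt, gpoSetCell, List.getD_eq_getElem?_getD, List.getElem?_modify, hg]
  · rw [if_neg (by tauto)]
    simp only [gpoCharAt, gpoSetCell, List.getD_eq_getElem?_getD, List.getElem?_modify]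
    have : (fun (a : List Char) => if R = r then a.set J ' ' else a) = id := by
      funext a; simp [Ne.symm hr]
    simp [this]

theorem gpoSetFold_length {β : Type} (cs : List β) (f1 f2 : β → Nat) (g : List (List Char)) :
    (cs.foldl (fun g c => gpoSetCell g (f1 c) (f2 c)) g).length = g.length := by
  induction cs generalizing g with
  | nil => rfl
  | cons c cs ih => rw [List.foldl_cons, ih, gpoSetCell_length]

theorem gpoSetFold_rowLen {β : Type} (cs : List β) (f1 f2 : β → Nat) (g : List (List Char)) (r : Nat) :
    ((cs.foldl (fun g c => gpoSetCell g (f1 c) (f2 c)) g).getD r []).length = (g.getD r []).length := by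
  induction cs generalizing g with
  | nil => rfl
  | cons c cs ih => rw [List.foldl_cons, ih, gpoSetCell_rowLen]

theorem gpoHFold_charAt (cs : List Int) (g : List (List Char)) (R r j : Nat)
    (hR : R < g.length) (hcs : ∀ c ∈ cs, (2 * c).toNat < (g.getD R []).length) :
    gpoCharAt (cs.foldl (fun g c => gpoSetCell g R (2 * c).toNat) g) r j =
      if r = R ∧ ∃ c ∈ cs, j = (2 * c).toNat then ' ' else gpoCharAt g r j := by
  induction cs generalizing g with
  | nil => simp
  | cons c cs ih =>
    rw [List.foldl_cons,
      ih (gpoSetCell g R (2 * c).toNat)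
        (by rw [gpoSetCell_length]; exact hR)
        (by intro c' hc'; rw [gpoSetCell_rowLen]; exact hcs c' (List.mem_cons_of_mem _ hc')),
      gpoSetCell_charAt]
    have hj : (2 * c).toNat < (g.getD R []).length := hcs c List.mem_cons_self
    simp only [List.exists_mem_cons_iff]
    by_cases hA : r = R ∧ ∃ c' ∈ cs, j = (2 * c').toNat
    · rw [if_pos hA, if_pos ⟨hA.1, Or.inr hA.2⟩]
    · rw [if_neg hA]
      by_cases hB : r = R ∧ j = (2 * c).toNat
      · rw [if_pos ⟨hB.1, hB.2, hR, hj⟩, if_pos ⟨hB.1, Or.inl hB.2⟩]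
      · rw [if_neg (by rintro ⟨x1, x2, -⟩; exact hB ⟨x1, x2⟩),
          if_neg (by rintro ⟨x1, x2 | x2⟩; exacts [hB ⟨x1, x2⟩, hA ⟨x1, x2⟩])]

theorem gpoVFold_charAt (cs : List Int) (g : List (List Char)) (J r j : Nat)
    (hcs : ∀ rr ∈ cs, rr.toNat < g.length ∧ J < (g.getD rr.toNat []).length) :
    gpoCharAt (cs.foldl (fun g rr => gpoSetCell g rr.toNat J) g) r j =
      if (∃ rr ∈ cs, r = rr.toNat) ∧ j = J then ' ' else gpoCharAt g r j := by
  induction cs generalizing g with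
  | nil => simp
  | cons c cs ih =>
    rw [List.foldl_cons,
      ih (gpoSetCell g c.toNat J)
        (by
          intro rr hrr
          constructor
          · rw [gpoSetCell_length]; exact (hcs rr (List.mem_cons_of_mem _ hrr)).1
          · rw [gpoSetCell_rowLen]; exact (hcs rr (List.mem_cons_of_mem _ hrr)).2),
      gpoSetCell_charAt]
    have hj := hcs c List.mem_cons_self
    simp only [List.exists_mem_cons_iff]
    by_cases hA : (∃ rr ∈ cs, r = rr.toNat) ∧ j = J
    · rw [if_pos hA, if_pos ⟨Or.inr hA.1, hA.2⟩]
    · rw [if_neg hA]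
      by_cases hB : r = c.toNat ∧ j = J
      · rw [if_pos ⟨hB.1, hB.2, hj.1, hj.2⟩, if_pos ⟨Or.inl hB.1, hB.2⟩]
      · rw [if_neg (by rintro ⟨x1, x2, -⟩; exact hB ⟨x1, x2⟩),
          if_neg (by rintro ⟨x1 | x1, x2⟩; exacts [hB ⟨x1, x2⟩, hA ⟨x1, x2⟩])]

def gpoWidthInv (g : List (List Char)) (nc : Int) : Prop :=
  ∀ i, i < g.length → (g.getD i []).length = 2 * nc.toNat + 1

theorem gpoPaint_length (nc nr : Int) (g : List (List Char)) (s : (Int × Int) × String × Int) :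
    (gpoPaint nc nr g s).length = g.length := by
  simp only [gpoPaint]
  split_ifs <;>
    first
      | rfl
      | exact gpoSetFold_length
          (PySem.List.pyRange (max (s.1.1 + 1) 1) (min (s.1.1 + s.2.2) nc) 1)
          (fun _ => s.1.2.toNat) (fun c => (2 * c).toNat) g
      | exact gpoSetFold_length
          (PySem.List.pyRange (max (s.1.2 + 1) 1) (min (s.1.2 + s.2.2) nr) 1)
          (fun r : Int => r.toNat) (fun _ => (2 * s.1.1 + 1).toNat) g

theorem gpoPaint_rowLen (nc nr : Int) (g : List (List Char)) (s : (Int × Int) × String × Int) (r : Nat) :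
    ((gpoPaint nc nr g s).getD r []).length = (g.getD r []).length := by
  simp only [gpoPaint]
  split_ifs <;>
    first
      | rfl
      | exact gpoSetFold_rowLen
          (PySem.List.pyRange (max (s.1.1 + 1) 1) (min (s.1.1 + s.2.2) nc) 1)
          (fun _ => s.1.2.toNat) (fun c => (2 * c).toNat) g r
      | exact gpoSetFold_rowLen
          (PySem.List.pyRange (max (s.1.2 + 1) 1) (min (s.1.2 + s.2.2) nr) 1)
          (fun r : Int => r.toNat) (fun _ => (2 * s.1.1 + 1).toNat) g r

theorem gpoPaint_charAt (nc nr : Int) (g : List (List Char)) (s : (Int × Int) × String × Int)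
    (r j : Nat) (hlen : g.length = (nr + 1).toNat) (hw : gpoWidthInv g nc) :
    gpoCharAt (gpoPaint nc nr g s) r j =
      if gpoPaintsAt nc nr s r j then ' ' else gpoCharAt g r j := by
  simp only [gpoPaint, gpoPaintsAt]
  by_cases hor : s.2.1 = "horizontal"
  · rw [if_pos hor]
    by_cases hg : 0 ≤ s.1.2 ∧ s.1.2 < nr
    · rw [if_pos hg]
      have hR : s.1.2.toNat < g.length := by rw [hlen]; omega
      rw [gpoHFold_charAt _ g s.1.2.toNat r j hR
        (by
          intro c hc
          rw [hw s.1.2.toNat hR]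
          rw [PySem.List.mem_pyRange_one] at hc
          omega)]
      refine if_congr ?_ rfl rfl
      constructor
      · rintro ⟨h1, h2⟩; exact Or.inl ⟨hor, hg.1, hg.2, h1, h2⟩
      · rintro (⟨-, -, -, h1, h2⟩ | ⟨hne, -⟩)
        · exact ⟨h1, h2⟩
        · exact absurd hor hne
    · rw [if_neg hg, if_neg ?_]
      rintro (⟨-, h1, h2, -⟩ | ⟨hne, -⟩)
      · exact hg ⟨h1, h2⟩
      · exact absurd hor hne
  · rw [if_neg hor]
    by_cases hver : s.2.1 = "vertical"
    · rw [if_pos hver]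
      by_cases hg : 0 ≤ s.1.1 ∧ s.1.1 < nc
      · rw [if_pos hg]
        rw [gpoVFold_charAt _ g (2 * s.1.1 + 1).toNat r j
          (by
            intro rr hrr
            rw [PySem.List.mem_pyRange_one] at hrr
            have h1 : rr.toNat < g.length := by rw [hlen]; omega
            refine ⟨h1, ?_⟩
            rw [hw rr.toNat h1]
            omega)]
        refine if_congr ?_ rfl rfl
        constructor
        · rintro ⟨h1, h2⟩; exact Or.inr ⟨hor, hver, hg.1, hg.2, h2, h1⟩
        · rintro (⟨h, -⟩ | ⟨-, -, -, -, h2, h1⟩)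
          · exact absurd h hor
          · exact ⟨h1, h2⟩
      · rw [if_neg hg, if_neg ?_]
        rintro (⟨h, -⟩ | ⟨-, -, h1, h2, -⟩)
        · exact absurd h hor
        · exact hg ⟨h1, h2⟩
    · rw [if_neg hver, if_neg ?_]
      rintro (⟨h, -⟩ | ⟨-, h, -⟩)
      · exact absurd h hor
      · exact absurd h hver

theorem gpoPaintFold_rowLen (nc nr : Int) (placing : List ((Int × Int) × String × Int))
    (g : List (List Char)) (r : Nat) :
    ((placing.foldl (gpoPaint nc nr) g).getD r []).length = (g.getD r []).length := by
  induction placing generalizing g with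
  | nil => rfl
  | cons s ps ih => rw [List.foldl_cons, ih, gpoPaint_rowLen]

theorem gpoPaintFold_charAt (nc nr : Int) (placing : List ((Int × Int) × String × Int))
    (g : List (List Char)) (r j : Nat)
    (hlen : g.length = (nr + 1).toNat) (hw : gpoWidthInv g nc) :
    gpoCharAt (placing.foldl (gpoPaint nc nr) g) r j =
      if ∃ s ∈ placing, gpoPaintsAt nc nr s r j then ' ' else gpoCharAt g r j := by
  induction placing generalizing g with
  | nil => simp
  | cons s ps ih =>
    rw [List.foldl_cons,
      ih (gpoPaint nc nr g s)
        (by rw [gpoPaint_length]; exact hlen)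
        (by
          intro i hi
          rw [gpoPaint_rowLen]
          exact hw i (by rwa [gpoPaint_length] at hi)),
      gpoPaint_charAt nc nr g s r j hlen hw]
    simp only [List.exists_mem_cons_iff]
    by_cases hA : ∃ s' ∈ ps, gpoPaintsAt nc nr s' r j
    · rw [if_pos hA, if_pos (Or.inr hA)]
    · rw [if_neg hA]
      by_cases hB : gpoPaintsAt nc nr s r j
      · rw [if_pos hB, if_pos (Or.inl hB)]
      · rw [if_neg hB, if_neg (by rintro (h | h); exacts [hB h, hA h])]

theorem gpoCells_fst (placing : List ((Int × Int) × String × Int))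
    (st : List (Int × Int) × List (Int × Int)) :
    (placing.foldl gpoCellsStep st).1 = st.1 ++ placing.flatMap gpoHCells := by
  induction placing generalizing st with
  | nil => simp
  | cons s ps ih =>
    rw [List.foldl_cons, ih]
    have h1 : (gpoCellsStep st s).1 = st.1 ++ gpoHCells s := by
      simp only [gpoCellsStep, gpoHCells]
      split_ifs with h1 h2
      · exact PySem.List.foldl_append_singleton_eq_map _ _ _
      · exact (List.append_nil _).symm
      · exact (List.append_nil _).symm
    rw [h1, List.flatMap_cons, List.append_assoc]

theorem gpoCells_snd (placing : List ((Int × Int) × String × Int))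
    (st : List (Int × Int) × List (Int × Int)) :
    (placing.foldl gpoCellsStep st).2 = st.2 ++ placing.flatMap gpoVCells := by
  induction placing generalizing st with
  | nil => simp
  | cons s ps ih =>
    rw [List.foldl_cons, ih]
    have h1 : (gpoCellsStep st s).2 = st.2 ++ gpoVCells s := by
      simp only [gpoCellsStep, gpoVCells]
      split_ifs with h1 h2
      · exact (List.append_nil _).symm
      · exact PySem.List.foldl_append_singleton_eq_map _ _ _
      · exact (List.append_nil _).symm
    rw [h1, List.flatMap_cons, List.append_assoc]

theorem gpo_mem_H (placing : List ((Int × Int) × String × Int)) (k ρ : Int) :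
    ((k, ρ) ∈ placing.flatMap gpoHCells) ↔
      ∃ s ∈ placing, s.2.1 = "horizontal" ∧ s.1.2 = ρ ∧ s.1.1 + 1 ≤ k ∧ k < s.1.1 + s.2.2 := by
  simp only [List.mem_flatMap]
  refine exists_congr fun s => and_congr_right fun _ => ?_
  unfold gpoHCells
  split_ifs with h
  · simp only [List.mem_map, PySem.List.mem_pyRange_one, Prod.mk.injEq]
    constructor
    · rintro ⟨i, ⟨hi1, hi2⟩, hk, hρ⟩
      exact ⟨h, hρ, by omega, by omega⟩
    · rintro ⟨-, hρ, h1, h2⟩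
      exact ⟨k - s.1.1, ⟨by omega, by omega⟩, by omega, hρ⟩
  · simp [h]

theorem gpo_mem_V (placing : List ((Int × Int) × String × Int)) (k ρ : Int) :
    ((k, ρ) ∈ placing.flatMap gpoVCells) ↔
      ∃ s ∈ placing, (s.2.1 ≠ "horizontal" ∧ s.2.1 = "vertical") ∧ s.1.1 = k ∧
        s.1.2 + 1 ≤ ρ ∧ ρ < s.1.2 + s.2.2 := by
  simp only [List.mem_flatMap]
  refine exists_congr fun s => and_congr_right fun _ => ?_
  unfold gpoVCells
  split_ifs with h1 h2
  · simp [h1]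
  · simp only [List.mem_map, PySem.List.mem_pyRange_one, Prod.mk.injEq]
    constructor
    · rintro ⟨i, ⟨hi1, hi2⟩, hk, hρ⟩
      exact ⟨⟨h1, h2⟩, hk, by omega, by omega⟩
    · rintro ⟨-, hk, ha, hb⟩
      exact ⟨ρ - s.1.2, ⟨by omega, by omega⟩, hk, by omega⟩
  · simp [h1, h2]

theorem gpoPaintsAt_even (nc nr : Int) (s : (Int × Int) × String × Int) (ρ : Int)
    (hρ : 0 ≤ ρ) (k : Nat) :
    gpoPaintsAt nc nr s ρ.toNat (2 * k) ↔
      (s.2.1 = "horizontal" ∧ s.1.2 = ρ ∧ ρ < nr ∧ s.1.1 + 1 ≤ (k : Int) ∧ 1 ≤ (k : Int) ∧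
        (k : Int) < s.1.1 + s.2.2 ∧ (k : Int) < nc) := by
  simp only [gpoPaintsAt, PySem.List.mem_pyRange_one]
  constructor
  · rintro (⟨h1, h2, h3, h4, c, ⟨hc1, hc2⟩, hc3⟩ | ⟨-, -, h3, -, h5, -⟩)
    · exact ⟨h1, by omega, by omega, by omega, by omega, by omega, by omega⟩
    · exfalso; omega
  · rintro ⟨h1, h2, h3, h4, h5, h6, h7⟩
    exact Or.inl ⟨h1, by omega, by omega, by omega, (k : Int), ⟨by omega, by omega⟩, by omega⟩

theorem gpoPaintsAt_odd (nc nr : Int) (s : (Int × Int) × String × Int) (ρ : Int)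
    (hρ : 0 ≤ ρ) (k : Nat) :
    gpoPaintsAt nc nr s ρ.toNat (2 * k + 1) ↔
      ((s.2.1 ≠ "horizontal" ∧ s.2.1 = "vertical") ∧ s.1.1 = (k : Int) ∧ (k : Int) < nc ∧
        s.1.2 + 1 ≤ ρ ∧ 1 ≤ ρ ∧ ρ < s.1.2 + s.2.2 ∧ ρ < nr) := by
  simp only [gpoPaintsAt, PySem.List.mem_pyRange_one]
  constructor
  · rintro (⟨-, -, -, -, c, ⟨hc1, hc2⟩, hc3⟩ | ⟨h1, h2, h3, h4, h5, rr, ⟨hr1, hr2⟩, hr3⟩)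
    · exfalso; omega
    · exact ⟨⟨h1, h2⟩, by omega, by omega, by omega, by omega, by omega, by omega⟩
  · rintro ⟨⟨h1, h2⟩, h3, h4, h5, h6, h7, h8⟩
    exact Or.inr ⟨h1, h2, by omega, by omega, by omega, ρ, ⟨by omega, by omega⟩, by omega⟩

theorem gpo_even_char (nc nr : Int) (placing : List ((Int × Int) × String × Int)) (ρ : Int)
    (hρ0 : 0 ≤ ρ) (k : Nat) (hk : (k : Int) ≤ nc) :
    (if ∃ s ∈ placing, gpoPaintsAt nc nr s ρ.toNat (2 * k) then ' '
     else if ρ < nr then '|' else ' ')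
    = (if ρ < nr ∧ ((k : Int) = 0 ∨ (k : Int) = nc ∨ ((k : Int), ρ) ∉ placing.flatMap gpoHCells)
       then '|' else ' ') := by
  have hiff : (∃ s ∈ placing, gpoPaintsAt nc nr s ρ.toNat (2 * k)) ↔
      (ρ < nr ∧ 1 ≤ (k : Int) ∧ (k : Int) < nc ∧ ((k : Int), ρ) ∈ placing.flatMap gpoHCells) := by
    rw [gpo_mem_H]
    constructor
    · rintro ⟨s, hs, h⟩
      rw [gpoPaintsAt_even nc nr s ρ hρ0 k] at h
      exact ⟨h.2.2.1, h.2.2.2.2.1, h.2.2.2.2.2.2, s, hs, h.1, h.2.1, h.2.2.2.1, h.2.2.2.2.2.1⟩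
    · rintro ⟨h1, h2, h3, s, hs, hh1, hh2, hh3, hh4⟩
      exact ⟨s, hs, (gpoPaintsAt_even nc nr s ρ hρ0 k).2 ⟨hh1, hh2, h1, hh3, h2, hh4, h3⟩⟩
  simp only [hiff]
  by_cases hmem : ((k : Int), ρ) ∈ placing.flatMap gpoHCells
  · by_cases h1 : ρ < nr
    · by_cases h2 : 1 ≤ (k : Int) ∧ (k : Int) < nc
      · rw [if_pos ⟨h1, h2.1, h2.2, hmem⟩, if_neg]
        rintro ⟨-, h | h | h⟩
        · omega
        · omega
        · exact h hmem
      · rw [if_neg (by rintro ⟨-, hb, hc, -⟩; exact h2 ⟨hb, hc⟩), if_pos h1,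
          if_pos ⟨h1, by omega⟩]
    · rw [if_neg (by rintro ⟨h, -⟩; exact h1 h), if_neg h1,
        if_neg (by rintro ⟨h, -⟩; exact h1 h)]
  · rw [if_neg (by rintro ⟨-, -, -, h⟩; exact hmem h)]
    by_cases h1 : ρ < nr
    · rw [if_pos h1, if_pos ⟨h1, Or.inr (Or.inr hmem)⟩]
    · rw [if_neg h1, if_neg (by rintro ⟨h, -⟩; exact h1 h)]

theorem gpo_odd_char (nc nr : Int) (placing : List ((Int × Int) × String × Int)) (ρ : Int)
    (hρ0 : 0 ≤ ρ) (hρnr : ρ ≤ nr) (k : Nat) (hk : (k : Int) < nc) :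
    (if ∃ s ∈ placing, gpoPaintsAt nc nr s ρ.toNat (2 * k + 1) then ' ' else '_')
    = (if ρ = 0 ∨ ρ = nr ∨ ((k : Int), ρ) ∉ placing.flatMap gpoVCells then '_' else ' ') := by
  have hiff : (∃ s ∈ placing, gpoPaintsAt nc nr s ρ.toNat (2 * k + 1)) ↔
      (1 ≤ ρ ∧ ρ < nr ∧ ((k : Int), ρ) ∈ placing.flatMap gpoVCells) := by
    rw [gpo_mem_V]
    constructor
    · rintro ⟨s, hs, h⟩
      rw [gpoPaintsAt_odd nc nr s ρ hρ0 k] at h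
      exact ⟨h.2.2.2.2.1, h.2.2.2.2.2.2, s, hs, h.1, h.2.1, h.2.2.2.1, h.2.2.2.2.2.1⟩
    · rintro ⟨h1, h2, s, hs, hh1, hh2, hh3, hh4⟩
      exact ⟨s, hs, (gpoPaintsAt_odd nc nr s ρ hρ0 k).2 ⟨hh1, hh2, hk, hh3, h1, hh4, h2⟩⟩
  simp only [hiff]
  by_cases hmem : ((k : Int), ρ) ∈ placing.flatMap gpoVCells
  · by_cases h1 : 1 ≤ ρ ∧ ρ < nr
    · rw [if_pos ⟨h1.1, h1.2, hmem⟩, if_neg]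
      rintro (h | h | h)
      · omega
      · omega
      · exact h hmem
    · rw [if_neg (by rintro ⟨ha, hb, -⟩; exact h1 ⟨ha, hb⟩), if_pos (by omega)]
  · rw [if_neg (by rintro ⟨-, -, h⟩; exact hmem h), if_pos (Or.inr (Or.inr hmem))]

theorem gpoPairs_length (f g : Int → Char) (cs : List Int) :
    (cs.flatMap (fun c => [f c, g c])).length = 2 * cs.length := by
  induction cs with
  | nil => rfl
  | cons c cs ih => simp [ih]; omega

theorem gpoPairs_even (f g : Int → Char) (cs : List Int) (k : Nat) :
    (cs.flatMap (fun c => [f c, g c]))[2 * k]? = cs[k]?.map f := by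
  induction cs generalizing k with
  | nil => simp
  | cons c cs ih =>
    cases k with
    | zero => simp
    | succ k =>
      have h2 : 2 * (k + 1) = 2 * k + 1 + 1 := by ring
      simp only [List.flatMap_cons, h2]
      rw [List.getElem?_append_right (by simp)]
      simp [ih]

theorem gpoPairs_odd (f g : Int → Char) (cs : List Int) (k : Nat) :
    (cs.flatMap (fun c => [f c, g c]))[2 * k + 1]? = cs[k]?.map g := by
  induction cs generalizing k with
  | nil => simp
  | cons c cs ih =>
    cases k with
    | zero => simp
    | succ k =>
      have h2 : 2 * (k + 1) + 1 = 2 * k + 1 + 1 + 1 := by ring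
      simp only [List.flatMap_cons, h2]
      rw [List.getElem?_append_right (by simp)]
      simp [ih]

theorem gpoRowShape_decomp (nc : Int) (h : 0 ≤ nc) (f g : Int → Char) :
    gpoRowShape nc f g =
      ((PySem.List.pyRange 0 nc 1).flatMap (fun c => [f c, g c])) ++ [f nc] := by
  unfold gpoRowShape
  rw [PySem.List.pyRange_one_succ_right h, List.flatMap_append]
  congr 1
  · refine List.flatMap_congr fun c hc => ?_
    rw [PySem.List.mem_pyRange_one] at hc
    simp [hc.2]
  · simp

theorem gpoRowShape_length (nc : Int) (h : 0 ≤ nc) (f g : Int → Char) :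
    (gpoRowShape nc f g).length = 2 * nc.toNat + 1 := by
  rw [gpoRowShape_decomp nc h]
  simp [gpoPairs_length, PySem.List.length_pyRange_one]
  omega

theorem gpoRowShape_even (nc : Int) (h : 0 ≤ nc) (f g : Int → Char) (k : Nat)
    (hk : (k : Int) ≤ nc) :
    (gpoRowShape nc f g)[2 * k]? = some (f (k : Int)) := by
  rw [gpoRowShape_decomp nc h]
  by_cases hlt : (k : Int) < nc
  · rw [List.getElem?_append_left
      (by rw [gpoPairs_length, PySem.List.length_pyRange_one]; omega)]
    rw [gpoPairs_even, PySem.List.getElem?_pyRange_one]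
    rw [if_pos (by omega)]
    simp
  · have hkeq : (k : Int) = nc := by omega
    rw [List.getElem?_append_right
      (by rw [gpoPairs_length, PySem.List.length_pyRange_one]; omega)]
    rw [gpoPairs_length, PySem.List.length_pyRange_one]
    have : 2 * k - 2 * (nc - 0).toNat = 0 := by omega
    rw [this]
    simp [hkeq]

theorem gpoRowShape_odd (nc : Int) (h : 0 ≤ nc) (f g : Int → Char) (k : Nat)
    (hk : (k : Int) < nc) :
    (gpoRowShape nc f g)[2 * k + 1]? = some (g (k : Int)) := by
  rw [gpoRowShape_decomp nc h]
  rw [List.getElem?_append_left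
    (by rw [gpoPairs_length, PySem.List.length_pyRange_one]; omega)]
  rw [gpoPairs_odd, PySem.List.getElem?_pyRange_one]
  rw [if_pos (by omega)]
  simp

theorem gpoDefaultRow_eq (nc nr r : Int) :
    gpoDefaultRow nc nr r =
      gpoRowShape nc (fun _ => if r < nr then '|' else ' ') (fun _ => '_') := by
  unfold gpoDefaultRow gpoRowShape
  have hbody : (fun (line : List Char) c =>
      let line := line ++ [if r < nr then '|' else ' ']
      if c < nc then line ++ ['_'] else line)
      = (fun (line : List Char) c =>
          line ++ ((if r < nr then '|' else ' ') :: (if c < nc then ['_'] else []))) := by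
    funext line c
    dsimp only
    split_ifs <;> simp
  rw [hbody, PySem.List.foldl_append_eq_flatMap]
  simp

theorem gpoG0_length (nc nr : Int) :
    ((PySem.List.pyRange 0 (nr + 1) 1).map (gpoDefaultRow nc nr)).length = (nr + 1).toNat := by
  simp [PySem.List.length_pyRange_one]

theorem gpoG0_getD (nc nr : Int) (i : Nat) (hi : i < (nr + 1).toNat) :
    ((PySem.List.pyRange 0 (nr + 1) 1).map (gpoDefaultRow nc nr)).getD i []
      = gpoDefaultRow nc nr (i : Int) := by
  rw [List.getD_eq_getElem?_getD, List.getElem?_map, PySem.List.getElem?_pyRange_one]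
  rw [if_pos (by omega)]
  simp

theorem gpoG0_widthInv (nc nr : Int) (hnc : 0 ≤ nc) :
    gpoWidthInv ((PySem.List.pyRange 0 (nr + 1) 1).map (gpoDefaultRow nc nr)) nc := by
  intro i hi
  rw [gpoG0_length] at hi
  rw [gpoG0_getD nc nr i hi, gpoDefaultRow_eq, gpoRowShape_length nc hnc]

theorem gpoAlevel (nc nr ρ : Int) (L V : List (Int × Int)) :
    ((PySem.List.pyRange 0 (nc + 1) 1).foldl (fun level col =>
      let cell := (col, ρ)
      let level := if ρ < nr ∧ (col = 0 ∨ col = nc ∨ cell ∉ L)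
                   then level ++ ['|'] else level ++ [' ']
      if col < nc then
        (if ρ = 0 ∨ ρ = nr ∨ cell ∉ V then level ++ ['_'] else level ++ [' '])
      else level) [])
    = gpoRowShape nc
        (fun c => if ρ < nr ∧ (c = 0 ∨ c = nc ∨ (c, ρ) ∉ L) then '|' else ' ')
        (fun c => if ρ = 0 ∨ ρ = nr ∨ (c, ρ) ∉ V then '_' else ' ') := by
  have hbody : (fun (level : List Char) col =>
      let cell := (col, ρ)
      let level := if ρ < nr ∧ (col = 0 ∨ col = nc ∨ cell ∉ L)
                   then level ++ ['|'] else level ++ [' ']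
      if col < nc then
        (if ρ = 0 ∨ ρ = nr ∨ cell ∉ V then level ++ ['_'] else level ++ [' '])
      else level)
      = (fun (level : List Char) col => level ++
          ((if ρ < nr ∧ (col = 0 ∨ col = nc ∨ (col, ρ) ∉ L) then '|' else ' ') ::
            (if col < nc then
              [if ρ = 0 ∨ ρ = nr ∨ (col, ρ) ∉ V then '_' else ' ']
            else []))) := by
    funext level col
    dsimp only
    split_ifs <;> simp
  rw [hbody, PySem.List.foldl_append_eq_flatMap, List.nil_append]
  rfl

theorem gpoGetElem?_getD {α : Type} (l : List α) (i : Nat) (d : α) (h : i < l.length) :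
    l[i]? = some (l.getD i d) := by
  rw [List.getD_eq_getElem?_getD, List.getElem?_eq_getElem h]
  rfl

theorem gpoRow_eq (placing : List ((Int × Int) × String × Int)) (nc nr ρ : Int)
    (hnc : 0 ≤ nc) (hρ0 : 0 ≤ ρ) (hρnr : ρ ≤ nr) :
    (placing.foldl (gpoPaint nc nr)
        ((PySem.List.pyRange 0 (nr + 1) 1).map (gpoDefaultRow nc nr))).getD ρ.toNat []
      = gpoRowShape nc
          (fun c => if ρ < nr ∧ (c = 0 ∨ c = nc ∨ (c, ρ) ∉ placing.flatMap gpoHCells)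
                    then '|' else ' ')
          (fun c => if ρ = 0 ∨ ρ = nr ∨ (c, ρ) ∉ placing.flatMap gpoVCells
                    then '_' else ' ') := by
  have hρlt : ρ.toNat < (nr + 1).toNat := by omega
  set G0 := (PySem.List.pyRange 0 (nr + 1) 1).map (gpoDefaultRow nc nr) with hG0
  set G := placing.foldl (gpoPaint nc nr) G0 with hG
  set fA := fun c => if ρ < nr ∧ (c = 0 ∨ c = nc ∨ (c, ρ) ∉ placing.flatMap gpoHCells)
                    then '|' else ' ' with hfA
  set gA := fun c => if ρ = 0 ∨ ρ = nr ∨ (c, ρ) ∉ placing.flatMap gpoVCells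
                    then '_' else ' ' with hgA
  have hg0len : G0.length = (nr + 1).toNat := gpoG0_length nc nr
  have hg0w : gpoWidthInv G0 nc := gpoG0_widthInv nc nr hnc
  have hPlen : (G.getD ρ.toNat []).length = 2 * nc.toNat + 1 := by
    rw [hG, gpoPaintFold_rowLen, hg0w ρ.toNat (by omega)]
  have hTlen := gpoRowShape_length nc hnc fA gA
  apply List.ext_getElem?
  intro i
  by_cases hi : i < 2 * nc.toNat + 1
  · have hPi : (G.getD ρ.toNat [])[i]? = some (gpoCharAt G ρ.toNat i) :=
      gpoGetElem?_getD _ i ' ' (by omega)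
    have hchar : gpoCharAt G ρ.toNat i =
        if ∃ s ∈ placing, gpoPaintsAt nc nr s ρ.toNat i then ' '
        else gpoCharAt G0 ρ.toNat i :=
      gpoPaintFold_charAt nc nr placing G0 ρ.toNat i hg0len hg0w
    have hD : gpoCharAt G0 ρ.toNat i
        = ((gpoRowShape nc (fun _ => if ρ < nr then '|' else ' ') (fun _ => '_'))[i]?).getD ' ' := by
      rw [gpoCharAt, hG0, gpoG0_getD nc nr ρ.toNat hρlt,
        show ((ρ.toNat : Int)) = ρ from by omega, gpoDefaultRow_eq,
        List.getD_eq_getElem?_getD]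
    rw [hPi, hchar, hD]
    rcases Nat.even_or_odd i with ⟨k, hk⟩ | ⟨k, hk⟩
    · have hik : i = 2 * k := by omega
      have hknc : (k : Int) ≤ nc := by omega
      subst hik
      rw [gpoRowShape_even nc hnc _ _ k hknc, gpoRowShape_even nc hnc fA gA k hknc]
      simp only [Option.getD_some]
      rw [hfA]
      exact congrArg some (gpo_even_char nc nr placing ρ hρ0 k hknc)
    · have hik : i = 2 * k + 1 := by omega
      have hknc : (k : Int) < nc := by omega
      subst hik
      rw [gpoRowShape_odd nc hnc _ _ k hknc, gpoRowShape_odd nc hnc fA gA k hknc]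
      simp only [Option.getD_some]
      rw [hgA]
      exact congrArg some (gpo_odd_char nc nr placing ρ hρ0 hρnr k hknc)
  · have h1 : (G.getD ρ.toNat [])[i]? = none := List.getElem?_eq_none_iff.2 (by omega)
    have h2 : (gpoRowShape nc fA gA)[i]? = none := List.getElem?_eq_none_iff.2 (by omega)
    rw [h1, h2]

-- ===== VERDICT (by name: the statement is the Claim_ definition above) =====
theorem get_placing_outline_spec : Claim_equal_get_placing_outline := by
  intro placing nc nr _
  unfold Spec_get_placing_outline
  simp only [get_placing_outline, get_placing_outline_alt]
  by_cases hnr : nr < 0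
  · rw [if_pos hnr, PySem.List.pyRange_neg_one_eq_nil (by omega)]
    rfl
  · rw [if_neg hnr, PySem.List.foldl_append_singleton_eq_map, List.nil_append]
    apply List.map_congr_left
    intro ρ hρ
    rw [PySem.List.mem_pyRange_neg_one] at hρ
    congr 1
    by_cases hnc : nc < 0
    · have hcols : PySem.List.pyRange 0 (nc + 1) 1 = [] :=
        PySem.List.pyRange_one_eq_nil (by omega)
      rw [hcols]
      have hzero : ((placing.foldl (gpoPaint nc nr)
          ((PySem.List.pyRange 0 (nr + 1) 1).map (gpoDefaultRow nc nr))).getD ρ.toNat []).length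
          = 0 := by
        rw [gpoPaintFold_rowLen, gpoG0_getD nc nr ρ.toNat (by omega)]
        unfold gpoDefaultRow
        rw [hcols]
        rfl
      rw [List.length_eq_zero_iff] at hzero
      rw [hzero]
      rfl
    · rw [gpoAlevel nc nr ρ (placing.foldl gpoCellsStep ([], [])).1
          (placing.foldl gpoCellsStep ([], [])).2,
        gpoRow_eq placing nc nr ρ (by omega) (by omega) (by omega)]
      have hf : (fun c => if ρ < nr ∧ (c = 0 ∨ c = nc ∨
            (c, ρ) ∉ (placing.foldl gpoCellsStep ([], [])).1) then '|' else ' ')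
          = (fun c => if ρ < nr ∧ (c = 0 ∨ c = nc ∨
            (c, ρ) ∉ placing.flatMap gpoHCells) then '|' else ' ') := by
        funext c
        simp only [gpoCells_fst placing ([], []), List.nil_append]
      have hg : (fun c => if ρ = 0 ∨ ρ = nr ∨
            (c, ρ) ∉ (placing.foldl gpoCellsStep ([], [])).2 then '_' else ' ')
          = (fun c => if ρ = 0 ∨ ρ = nr ∨
            (c, ρ) ∉ placing.flatMap gpoVCells then '_' else ' ') := by
        funext c
        simp only [gpoCells_snd placing ([], []), List.nil_append]
      rw [hf, hg]
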